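-- pv_equiv track=rewrite | github.com/Project-SWEnergy/doc-latex | scripts/glossario_builder.py | glossary_builder
-- ===== SOURCE A (Python) =====
-- def glossary_builder(glossario: list):
--     tex = '\\makeglossaries\n'
--     prev_letter = ''
--     for word, definition in glossario:
--         if word[0] != prev_letter:
--             prev_letter = word[0]
--             tex += f'\n% {word[0]}\n\n'
--         tex += f'\\newglossaryentry{{{word}}}{{\n\tname={word},\n\tdescription={{{definition}}}\n}}\n'
--     tex += '\\glsaddall\n'
--     return tex
-- ===== SOURCE B (Python) =====
-- def glossary_builder(glossario: list):
--     # group-then-emit decomposition: scan out each maximal run of entries sharing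
--     # a first letter, emit one header per run, then the run's entries; join once.
--     parts = ['\\makeglossaries\n']
--     i, n = 0, len(glossario)
--     while i < n:
--         letter = glossario[i][0][0]
--         parts.append(f'\n% {letter}\n\n')
--         j = i
--         while j < n and glossario[j][0][0] == letter:
--             word, definition = glossario[j]
--             parts.append(f'\\newglossaryentry{{{word}}}{{\n\tname={word},\n\tdescription={{{definition}}}\n}}\n')
--             j += 1
--         i = j
--     parts.append('\\glsaddall\n')
--     return ''.join(parts)
-- ===== Notes on version B (the rewrite author's own statement) =====
-- stated objective: alternative
-- what changed: Replaces the single pass with a mutable prev_letter sentinel and string += by a two-level run-grouping traversal (outer loop per maximal run of a shared first letter emitting one header, inner loop emitting that run's entries) collected into a list and joined once.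
import Mathlib
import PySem

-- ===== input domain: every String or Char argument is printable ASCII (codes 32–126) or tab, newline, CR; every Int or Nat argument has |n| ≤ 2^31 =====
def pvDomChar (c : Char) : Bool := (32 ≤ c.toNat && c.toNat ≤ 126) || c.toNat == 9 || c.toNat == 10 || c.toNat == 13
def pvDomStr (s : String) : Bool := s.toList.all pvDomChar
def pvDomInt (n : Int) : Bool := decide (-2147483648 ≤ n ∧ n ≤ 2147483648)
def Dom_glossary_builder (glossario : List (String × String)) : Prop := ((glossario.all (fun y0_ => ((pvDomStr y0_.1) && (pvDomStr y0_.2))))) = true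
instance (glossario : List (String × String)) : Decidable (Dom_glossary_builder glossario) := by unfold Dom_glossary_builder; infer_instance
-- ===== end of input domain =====

-- B replaces A's prev_letter sentinel and += accumulation by a two-level run-grouping
-- traversal (one header per maximal run of a shared first letter); alternative decomposition.


-- first character of a word; equals Python's word[0] whenever the word is nonempty
-- (Pre_ guarantees that; on an empty word Python raises IndexError).
def pvHd (w : String) : Char := w.toList.headD ' '

-- the '\newglossaryentry' block for one (word, definition) pair
def pvEntry (word defn : String) : String :=
  "\\newglossaryentry{" ++ word ++ "}{\n\tname=" ++ word ++ ",\n\tdescription={" ++ defn ++ "}\n}\n"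

-- the '% letter' header
def pvHeader (c : Char) : String := "\n% " ++ String.singleton c ++ "\n\n"

-- ===== PORT A =====
-- A's loop body: state (tex, prev_letter), branches in A's order
def pvStepA (st : String × String) (wd : String × String) : String × String :=
  let c := pvHd wd.1
  let st :=
    if String.singleton c ≠ st.2 then (st.1 ++ pvHeader c, String.singleton c)
    else st
  (st.1 ++ pvEntry wd.1 wd.2, st.2)

-- fold over the list with state (tex, prev_letter), exactly as A's loop
def glossary_builder (glossario : List (String × String)) : String :=
  (glossario.foldl pvStepA ("\\makeglossaries\n", "")).1 ++ "\\glsaddall\n"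

-- ===== PORT B =====
-- B's outer while loop: peel off one maximal run of a shared first letter per step
def pvEmitRuns : List (String × String) → String
  | [] => ""
  | wd :: rest =>
    let c := pvHd wd.1
    pvHeader c
      ++ pvEntry wd.1 wd.2
      ++ String.join ((rest.takeWhile (fun x => pvHd x.1 == c)).map (fun x => pvEntry x.1 x.2))
      ++ pvEmitRuns (rest.dropWhile (fun x => pvHd x.1 == c))
termination_by l => l.length
decreasing_by exact Nat.lt_succ_of_le (List.length_dropWhile_le _ _)

def glossary_builder_alt (glossario : List (String × String)) : String :=
  "\\makeglossaries\n" ++ pvEmitRuns glossario ++ "\\glsaddall\n"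

-- ===== PRECONDITION & SPEC =====
-- Pre_ excludes lists containing an empty word, on which A raises IndexError at word[0]
-- (B raises the same way there).
def Pre_glossary_builder (glossario : List (String × String)) : Prop :=
  ∀ wd ∈ glossario, wd.1 ≠ ""
instance (glossario : List (String × String)) : Decidable (Pre_glossary_builder glossario) := by
  unfold Pre_glossary_builder; infer_instance
def pvWitness_glossary_builder : (List (String × String)) :=
  [("apple", "a fruit"), ("ant", "an insect"), ("bee", "another insect")]

def Spec_glossary_builder (glossario : List (String × String)) (out : String) : Prop := out = glossary_builder_alt glossario
instance (glossario : List (String × String)) (out : String) : Decidable (Spec_glossary_builder glossario out) := by unfold Spec_glossary_builder; infer_instance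

-- ===== CLAIM (what is proved, stated in full; the proofs are below) =====
def Claim_equal_glossary_builder : Prop := ∀ (glossario : List (String × String)), Dom_glossary_builder glossario → Pre_glossary_builder glossario → Spec_glossary_builder glossario (glossary_builder glossario)

-- ===== LEMMAS AND PROOFS =====

-- A's loop body, abstracted: the text A appends after state prev while consuming l
def pvRender : List (String × String) → String → String
  | [], _ => ""
  | wd :: rest, prev =>
    let c := pvHd wd.1
    (if String.singleton c ≠ prev then pvHeader c else "")
      ++ pvEntry wd.1 wd.2 ++ pvRender rest (String.singleton c)

theorem pvSingleton_inj {a b : Char} (h : String.singleton a = String.singleton b) : a = b := by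
  have := congrArg String.toList h
  simpa [String.singleton] using this

theorem pvJoin_cons (s : String) (l : List String) :
    String.join (s :: l) = s ++ String.join l := by
  simp [String.join_eq]

-- extraction: A's foldl appends pvRender to the accumulator
theorem pvFoldl_render (l : List (String × String)) (t p : String) :
    (l.foldl pvStepA (t, p)).1 = t ++ pvRender l p := by
  induction l generalizing t p with
  | nil => simp [pvRender]
  | cons wd rest ih =>
    rw [List.foldl_cons]
    by_cases h : String.singleton (pvHd wd.1) = p
    · have hs : pvStepA (t, p) wd = (t ++ pvEntry wd.1 wd.2, p) := by
        simp [pvStepA, h]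
      rw [hs, ih]
      simp [pvRender, h, String.append_assoc]
    · have hs : pvStepA (t, p) wd
          = (t ++ pvHeader (pvHd wd.1) ++ pvEntry wd.1 wd.2, String.singleton (pvHd wd.1)) := by
        simp [pvStepA, h]
      rw [hs, ih]
      simp [pvRender, h, String.append_assoc]

-- key lemma: A's render with prev = the current run's letter equals B's
-- "entries of the run, then the remaining runs"
theorem pvRender_run (rest : List (String × String)) (c : Char) :
    pvRender rest (String.singleton c)
      = String.join ((rest.takeWhile (fun x => pvHd x.1 == c)).map (fun x => pvEntry x.1 x.2))
        ++ pvEmitRuns (rest.dropWhile (fun x => pvHd x.1 == c)) := by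
  induction rest generalizing c with
  | nil => simp [pvRender, pvEmitRuns, String.join]
  | cons b rest' ih =>
    by_cases h : pvHd b.1 = c
    · simp only [pvRender, List.takeWhile_cons, List.dropWhile_cons, h, beq_self_eq_true,
        if_pos, List.map_cons, pvJoin_cons]
      simp [ih, String.append_assoc]
    · have hne : String.singleton (pvHd b.1) ≠ String.singleton c :=
        fun hs => h (pvSingleton_inj hs)
      simp only [pvRender, List.takeWhile_cons, List.dropWhile_cons, beq_iff_eq, h, ite_false]
      rw [pvEmitRuns]
      simp [hne, ih (pvHd b.1), String.join, String.append_assoc]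

theorem pvRender_eq_emitRuns (l : List (String × String)) (p : String)
    (h : ∀ wd rest, l = wd :: rest → String.singleton (pvHd wd.1) ≠ p) :
    pvRender l p = pvEmitRuns l := by
  cases l with
  | nil => simp [pvRender, pvEmitRuns]
  | cons wd rest =>
    rw [pvEmitRuns, pvRender]
    simp [h wd rest rfl, pvRender_run, String.append_assoc]

-- ===== VERDICT (by name: the statement is the Claim_ definition above) =====
theorem glossary_builder_spec : Claim_equal_glossary_builder := by
  intro g _ _
  unfold Spec_glossary_builder glossary_builder glossary_builder_alt
  rw [pvFoldl_render, pvRender_eq_emitRuns, String.append_assoc]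
  intro wd rest _ hs
  have := congrArg String.length hs
  simp [String.singleton] at this
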